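-- pv_equiv track=rewrite | github.com/ChristianLeininger/algoExpert | search/hard/searchForRange/searchForRange.py | searchForRange
-- ===== SOURCE A (Python) =====
-- from typing import List
--
-- def searchForRange(array: List, target: int) -> List:
--     """ O(log(n)) time | O(1) space
--
--     Args:
--         param1(list): array
--         param2(int): target
--     Return list of start and end index of target
--     """
--     start = 0
--     end = len(array) - 1
--     while start <= end:
--         idx = (start + end) // 2
--         if array[idx] == target:
--             start = idx
--             end = idx
--             while start > 0 and array[start - 1] == target:
--                 start -= 1
--             while end < len(array) - 1 and array[end + 1] == target:
--                 end += 1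
--             return [start, end]
--         elif array[idx] < target:
--             # go right
--             start = idx + 1
--         else:
--             # go left
--             end = idx - 1
--     return [-1, -1]
-- ===== SOURCE B (Python) =====
-- from typing import List
--
-- def searchForRange(array: List, target: int) -> List:
--     """Two binary searches: leftmost insertion point and rightmost bound."""
--     n = len(array)
--     # leftmost index with array[i] >= target
--     lo, hi = 0, n
--     while lo < hi:
--         mid = (lo + hi) // 2
--         if array[mid] < target:
--             lo = mid + 1
--         else:
--             hi = mid
--     left = lo
--     if left == n or array[left] != target:
--         return [-1, -1]
--     # first index with array[i] > target
--     lo, hi = left, n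
--     while lo < hi:
--         mid = (lo + hi) // 2
--         if array[mid] <= target:
--             lo = mid + 1
--         else:
--             hi = mid
--     return [left, lo - 1]
-- ===== Notes on version B (the rewrite author's own statement) =====
-- stated objective: alternative
-- what changed: Replaced A's single binary search followed by linear left/right expansion over the run of equal elements with two pure binary searches (bisect_left and bisect_right) that locate the boundaries directly.
-- outside the precondition, e.g. on searchForRange([1, 0], 1): A returns [0, 0], B returns [-1, -1]
import Mathlib
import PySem

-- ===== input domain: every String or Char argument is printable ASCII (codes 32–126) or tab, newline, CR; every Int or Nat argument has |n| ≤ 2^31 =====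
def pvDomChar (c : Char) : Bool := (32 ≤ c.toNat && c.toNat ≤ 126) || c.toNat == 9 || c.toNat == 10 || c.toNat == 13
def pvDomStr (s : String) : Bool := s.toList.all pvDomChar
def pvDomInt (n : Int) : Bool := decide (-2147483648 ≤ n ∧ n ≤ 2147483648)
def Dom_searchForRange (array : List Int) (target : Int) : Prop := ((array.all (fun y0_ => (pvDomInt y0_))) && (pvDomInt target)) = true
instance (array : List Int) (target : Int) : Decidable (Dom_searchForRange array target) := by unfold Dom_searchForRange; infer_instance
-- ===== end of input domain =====

-- B replaces A's binary-search-then-linear-expansion with two pure binary searches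
-- (leftmost and rightmost bound); equivalence is proved on sorted arrays (Pre_).

-- midpoint strict upper bound, needed by the ports' termination proofs
theorem pvMidLt (lo hi : Int) (h : lo < hi) :
    PySem.Int.floordiv (lo + hi) 2 < hi := by
  rw [PySem.Int.floordiv_eq_ediv_of_pos (by omega)]; omega

-- ===== PORT A =====
-- inner 'while start > 0 and array[start-1] == target: start -= 1'
def pvAExpandL (array : List Int) (target : Int) (start : Int) : Int :=
  if h : 0 < start ∧ PySem.List.pyGetD array (start - 1) 0 = target then
    pvAExpandL array target (start - 1)
  else start
termination_by start.toNat
decreasing_by omega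

-- inner 'while end < len(array)-1 and array[end+1] == target: end += 1'
def pvAExpandR (array : List Int) (target : Int) (e : Int) : Int :=
  if h : e < (array.length : Int) - 1 ∧ PySem.List.pyGetD array (e + 1) 0 = target then
    pvAExpandR array target (e + 1)
  else e
termination_by ((array.length : Int) - 1 - e).toNat
decreasing_by omega

-- outer 'while start <= end' loop (array[idx] is always in range, so the getD default is unreachable)
def pvALoop (array : List Int) (target : Int) (start e : Int) : List Int :=
  if h : start ≤ e then
    let idx := PySem.Int.floordiv (start + e) 2
    let v := PySem.List.pyGetD array idx 0
    if v = target then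
      [pvAExpandL array target idx, pvAExpandR array target idx]
    else if v < target then
      pvALoop array target (idx + 1) e
    else
      pvALoop array target start (idx - 1)
  else [-1, -1]
termination_by (e - start + 1).toNat
decreasing_by
  · have := PySem.Int.floordiv_two_mid_bounds h; omega
  · have := PySem.Int.floordiv_two_mid_bounds h; omega

def searchForRange (array : List Int) (target : Int) : List Int :=
  pvALoop array target 0 ((array.length : Int) - 1)

-- ===== PORT B =====
-- leftmost index with array[i] >= target (bisect_left)
def pvBisectL (array : List Int) (target : Int) (lo hi : Int) : Int :=
  if h : lo < hi then
    let mid := PySem.Int.floordiv (lo + hi) 2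
    if PySem.List.pyGetD array mid 0 < target then
      pvBisectL array target (mid + 1) hi
    else
      pvBisectL array target lo mid
  else lo
termination_by (hi - lo).toNat
decreasing_by
  · have := PySem.Int.floordiv_two_mid_bounds (le_of_lt h); omega
  · have := pvMidLt lo hi h; omega

-- first index with array[i] > target (bisect_right)
def pvBisectR (array : List Int) (target : Int) (lo hi : Int) : Int :=
  if h : lo < hi then
    let mid := PySem.Int.floordiv (lo + hi) 2
    if PySem.List.pyGetD array mid 0 ≤ target then
      pvBisectR array target (mid + 1) hi
    else
      pvBisectR array target lo mid
  else lo
termination_by (hi - lo).toNat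
decreasing_by
  · have := PySem.Int.floordiv_two_mid_bounds (le_of_lt h); omega
  · have := pvMidLt lo hi h; omega

def searchForRange_alt (array : List Int) (target : Int) : List Int :=
  let n : Int := (array.length : Int)
  let left := pvBisectL array target 0 n
  if left = n then [-1, -1]
  else if PySem.List.pyGetD array left 0 ≠ target then [-1, -1]
  else [left, pvBisectR array target left n - 1]

-- ===== PRECONDITION & SPEC =====
-- Pre_ admits the function's natural domain (a nondecreasing array) and, besides,
-- every array not containing the target (both programs provably return [-1,-1] there).
-- It excludes only unsorted arrays that do contain the target: there A's value is an
-- accident of the probe order of a binary search over unsorted data (see claim.json "cites").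
def Pre_searchForRange (array : List Int) (target : Int) : Prop :=
  array.Pairwise (· ≤ ·) ∨ target ∉ array
instance (array : List Int) (target : Int) : Decidable (Pre_searchForRange array target) := by
  unfold Pre_searchForRange; infer_instance

def pvWitness_searchForRange : List Int × Int := ([1, 2, 2, 3], 2)

def Spec_searchForRange (array : List Int) (target : Int) (out : List Int) : Prop := out = searchForRange_alt array target
instance (array : List Int) (target : Int) (out : List Int) : Decidable (Spec_searchForRange array target out) := by unfold Spec_searchForRange; infer_instance

-- ===== CLAIM (what is proved, stated in full; the proofs are below) =====
def Claim_equal_searchForRange : Prop := ∀ (array : List Int) (target : Int), Dom_searchForRange array target → Pre_searchForRange array target → Spec_searchForRange array target (searchForRange array target)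

-- ===== LEMMAS AND PROOFS =====

-- number of elements strictly below / not above the target
def pvCntLt (array : List Int) (target : Int) : Nat := array.countP (fun a => decide (a < target))
def pvCntLe (array : List Int) (target : Int) : Nat := array.countP (fun a => decide (a ≤ target))

theorem pvCntLt_le_cntLe (array : List Int) (target : Int) :
    pvCntLt array target ≤ pvCntLe array target := by
  exact List.countP_mono_left (fun a _ h => by simp_all; omega)

theorem pvCntLe_le_length (array : List Int) (target : Int) :
    pvCntLe array target ≤ array.length := List.countP_le_length

-- in a sorted list, a downward-closed predicate holds exactly on a prefix of indices
theorem pvPrefixChar (p : Int → Bool) (hp : ∀ a b : Int, a ≤ b → p b = true → p a = true) :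
    ∀ (l : List Int), l.Pairwise (· ≤ ·) → ∀ i (hi : i < l.length),
      (p l[i] = true ↔ i < l.countP p) := by
  intro l
  induction l with
  | nil => intro _ i hi; simp at hi
  | cons a tl ih =>
    intro hl i hi
    have hpw := List.pairwise_cons.mp hl
    cases i with
    | zero =>
      by_cases hpa : p a = true
      · simp [hpa]
      · have h0 : tl.countP p = 0 :=
          List.countP_eq_zero.mpr (fun x hx hpx => hpa (hp a x (hpw.1 x hx) hpx))
        simp [hpa, h0]
    | succ j =>
      have hj : j < tl.length := by simpa using hi
      have IH := ih hpw.2 j hj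
      by_cases hpa : p a = true
      · simp [hpa, IH]
      · have h0 : tl.countP p = 0 :=
          List.countP_eq_zero.mpr (fun x hx hpx => hpa (hp a x (hpw.1 x hx) hpx))
        have hnot : ¬ p tl[j] = true := fun hpj => by
          have := List.countP_eq_zero.mp h0 _ (List.getElem_mem hj)
          simp_all
        simp [hpa, h0, hnot]

theorem pvCharLt (array : List Int) (target : Int) (hs : array.Pairwise (· ≤ ·))
    (i : Nat) (hi : i < array.length) :
    (array[i] < target ↔ i < pvCntLt array target) := by
  have := pvPrefixChar (fun a => decide (a < target))
    (fun a b hab hb => by simp_all; omega) array hs i hi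
  simpa [pvCntLt] using this

theorem pvCharLe (array : List Int) (target : Int) (hs : array.Pairwise (· ≤ ·))
    (i : Nat) (hi : i < array.length) :
    (array[i] ≤ target ↔ i < pvCntLe array target) := by
  have := pvPrefixChar (fun a => decide (a ≤ target))
    (fun a b hab hb => by simp_all; omega) array hs i hi
  simpa [pvCntLe] using this

theorem pvCharEq (array : List Int) (target : Int) (hs : array.Pairwise (· ≤ ·))
    (i : Nat) (hi : i < array.length) :
    (array[i] = target ↔ (pvCntLt array target ≤ i ∧ i < pvCntLe array target)) := by
  have h1 := pvCharLt array target hs i hi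
  have h2 := pvCharLe array target hs i hi
  constructor
  · intro h; rw [h] at h1 h2; omega
  · intro h
    have := h2.mpr h.2
    have := (not_iff_not.mpr h1).mpr (by omega)
    omega

-- getD on a provably in-range Int index, phrased through the prefix characterisation
theorem pvGetChar (array : List Int) (target : Int) (hs : array.Pairwise (· ≤ ·))
    (i : Int) (h0 : 0 ≤ i) (hn : i < (array.length : Int)) :
    (PySem.List.pyGetD array i 0 < target ↔ i < (pvCntLt array target : Int)) ∧
    (PySem.List.pyGetD array i 0 ≤ target ↔ i < (pvCntLe array target : Int)) ∧
    (PySem.List.pyGetD array i 0 = target ↔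
      ((pvCntLt array target : Int) ≤ i ∧ i < (pvCntLe array target : Int))) := by
  have hi : i.toNat < array.length := by omega
  have hg : PySem.List.pyGetD array i 0 = array[i.toNat] :=
    PySem.List.pyGetD_eq_getElem array 0 h0 hn
  have h1 := pvCharLt array target hs i.toNat hi
  have h2 := pvCharLe array target hs i.toNat hi
  have h3 := pvCharEq array target hs i.toNat hi
  refine ⟨?_, ?_, ?_⟩ <;> rw [hg]
  · rw [h1]; omega
  · rw [h2]; omega
  · rw [h3]; omega

theorem pvBisectL_eq (array : List Int) (target : Int) (hs : array.Pairwise (· ≤ ·)) :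
    ∀ (k : Nat) (lo hi : Int), (hi - lo).toNat ≤ k → 0 ≤ lo →
      lo ≤ (pvCntLt array target : Int) → (pvCntLt array target : Int) ≤ hi →
      hi ≤ (array.length : Int) →
      pvBisectL array target lo hi = (pvCntLt array target : Int) := by
  intro k
  induction k with
  | zero =>
    intro lo hi hk h0 hl hr hn
    rw [pvBisectL]
    rw [dif_neg (by omega)]
    omega
  | succ m ih =>
    intro lo hi hk h0 hl hr hn
    rw [pvBisectL]
    by_cases h : lo < hi
    · rw [dif_pos h]
      have hmid := PySem.Int.floordiv_two_mid_bounds (le_of_lt h)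
      have hmlt := pvMidLt lo hi h
      set mid := PySem.Int.floordiv (lo + hi) 2 with hmiddef
      have hc := pvGetChar array target hs mid (by omega) (by omega)
      by_cases hv : PySem.List.pyGetD array mid 0 < target
      · rw [if_pos hv]
        have : mid < (pvCntLt array target : Int) := hc.1.mp hv
        exact ih (mid + 1) hi (by omega) (by omega) (by omega) hr hn
      · rw [if_neg hv]
        have : ¬ mid < (pvCntLt array target : Int) := fun hlt => hv (hc.1.mpr hlt)
        exact ih lo mid (by omega) h0 hl (by omega) (by omega)
    · rw [dif_neg h]; omega

theorem pvBisectR_eq (array : List Int) (target : Int) (hs : array.Pairwise (· ≤ ·)) :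
    ∀ (k : Nat) (lo hi : Int), (hi - lo).toNat ≤ k → 0 ≤ lo →
      lo ≤ (pvCntLe array target : Int) → (pvCntLe array target : Int) ≤ hi →
      hi ≤ (array.length : Int) →
      pvBisectR array target lo hi = (pvCntLe array target : Int) := by
  intro k
  induction k with
  | zero =>
    intro lo hi hk h0 hl hr hn
    rw [pvBisectR]
    rw [dif_neg (by omega)]
    omega
  | succ m ih =>
    intro lo hi hk h0 hl hr hn
    rw [pvBisectR]
    by_cases h : lo < hi
    · rw [dif_pos h]
      have hmid := PySem.Int.floordiv_two_mid_bounds (le_of_lt h)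
      have hmlt := pvMidLt lo hi h
      set mid := PySem.Int.floordiv (lo + hi) 2 with hmiddef
      have hc := pvGetChar array target hs mid (by omega) (by omega)
      by_cases hv : PySem.List.pyGetD array mid 0 ≤ target
      · rw [if_pos hv]
        have : mid < (pvCntLe array target : Int) := (hc.2.1).mp hv
        exact ih (mid + 1) hi (by omega) (by omega) (by omega) hr hn
      · rw [if_neg hv]
        have : ¬ mid < (pvCntLe array target : Int) := fun hlt => hv (hc.2.1.mpr hlt)
        exact ih lo mid (by omega) h0 hl (by omega) (by omega)
    · rw [dif_neg h]; omega

theorem pvAExpandL_eq (array : List Int) (target : Int) (hs : array.Pairwise (· ≤ ·)) :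
    ∀ (k : Nat) (s : Int), (s - (pvCntLt array target : Int)).toNat ≤ k →
      (pvCntLt array target : Int) ≤ s → s < (pvCntLe array target : Int) →
      pvAExpandL array target s = (pvCntLt array target : Int) := by
  intro k
  induction k with
  | zero =>
    intro s hk hl hr
    have hse : s = (pvCntLt array target : Int) := by omega
    rw [pvAExpandL]
    rw [dif_neg]
    · exact hse
    · rintro ⟨h0, heq⟩
      have hle := pvCntLe_le_length array target
      have hc := pvGetChar array target hs (s - 1) (by omega) (by omega)
      have := hc.2.2.mp heq
      omega
  | succ m ih =>
    intro s hk hl hr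
    by_cases hse : s = (pvCntLt array target : Int)
    · rw [pvAExpandL]
      rw [dif_neg]
      · exact hse
      · rintro ⟨h0, heq⟩
        have hle := pvCntLe_le_length array target
        have hc := pvGetChar array target hs (s - 1) (by omega) (by omega)
        have := hc.2.2.mp heq
        omega
    · rw [pvAExpandL]
      have hle := pvCntLe_le_length array target
      have hc := pvGetChar array target hs (s - 1) (by omega) (by omega)
      rw [dif_pos ⟨by omega, hc.2.2.mpr (by omega)⟩]
      exact ih (s - 1) (by omega) (by omega) (by omega)

theorem pvAExpandR_eq (array : List Int) (target : Int) (hs : array.Pairwise (· ≤ ·)) :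
    ∀ (k : Nat) (s : Int), ((pvCntLe array target : Int) - 1 - s).toNat ≤ k →
      (pvCntLt array target : Int) ≤ s → s < (pvCntLe array target : Int) →
      pvAExpandR array target s = (pvCntLe array target : Int) - 1 := by
  intro k
  induction k with
  | zero =>
    intro s hk hl hr
    have hse : s = (pvCntLe array target : Int) - 1 := by omega
    rw [pvAExpandR]
    rw [dif_neg]
    · exact hse
    · rintro ⟨hlt, heq⟩
      have hc := pvGetChar array target hs (s + 1) (by omega) (by omega)
      have := hc.2.2.mp heq
      omega
  | succ m ih =>
    intro s hk hl hr
    by_cases hse : s = (pvCntLe array target : Int) - 1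
    · rw [pvAExpandR]
      rw [dif_neg]
      · exact hse
      · rintro ⟨hlt, heq⟩
        have hc := pvGetChar array target hs (s + 1) (by omega) (by omega)
        have := hc.2.2.mp heq
        omega
    · rw [pvAExpandR]
      have hle := pvCntLe_le_length array target
      rw [dif_pos ⟨by omega, (pvGetChar array target hs (s + 1) (by omega) (by omega)).2.2.mpr (by omega)⟩]
      exact ih (s + 1) (by omega) (by omega) (by omega)

-- the canonical result both programs compute on sorted input
def pvCanon (array : List Int) (target : Int) : List Int :=
  if (pvCntLt array target : Int) < (pvCntLe array target : Int) then
    [(pvCntLt array target : Int), (pvCntLe array target : Int) - 1]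
  else [-1, -1]

theorem pvALoop_eq (array : List Int) (target : Int) (hs : array.Pairwise (· ≤ ·)) :
    ∀ (k : Nat) (start e : Int), (e - start + 1).toNat ≤ k → 0 ≤ start →
      start ≤ (pvCntLt array target : Int) → (pvCntLe array target : Int) ≤ e + 1 →
      e ≤ (array.length : Int) - 1 →
      pvALoop array target start e = pvCanon array target := by
  intro k
  induction k with
  | zero =>
    intro start e hk h0 hl hr hn
    have hmono := pvCntLt_le_cntLe array target
    rw [pvALoop]
    rw [dif_neg (by omega)]
    rw [pvCanon, if_neg (by omega)]
  | succ m ih =>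
    intro start e hk h0 hl hr hn
    rw [pvALoop]
    by_cases h : start ≤ e
    · rw [dif_pos h]
      have hmid := PySem.Int.floordiv_two_mid_bounds h
      set idx := PySem.Int.floordiv (start + e) 2 with hidxdef
      have hc := pvGetChar array target hs idx (by omega) (by omega)
      by_cases hv : PySem.List.pyGetD array idx 0 = target
      · rw [if_pos hv]
        have hin := hc.2.2.mp hv
        rw [pvAExpandL_eq array target hs (idx - (pvCntLt array target : Int)).toNat idx
              (le_refl _) (by omega) (by omega),
            pvAExpandR_eq array target hs ((pvCntLe array target : Int) - 1 - idx).toNat idx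
              (le_refl _) (by omega) (by omega)]
        rw [pvCanon, if_pos (by omega)]
      · rw [if_neg hv]
        by_cases hlt : PySem.List.pyGetD array idx 0 < target
        · rw [if_pos hlt]
          have := hc.1.mp hlt
          exact ih (idx + 1) e (by omega) (by omega) (by omega) hr hn
        · rw [if_neg hlt]
          have h1 : ¬ idx < (pvCntLt array target : Int) := fun hx => hlt (hc.1.mpr hx)
          have h2 : ¬ idx < (pvCntLe array target : Int) := fun hx => by
            have h3 := hc.2.1.mpr hx
            rcases lt_or_eq_of_le h3 with h4 | h4
            · exact hlt h4
            · exact hv h4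
          exact ih start (idx - 1) (by omega) h0 hl (by omega) (by omega)
    · rw [dif_neg h]
      have hmono := pvCntLt_le_cntLe array target
      rw [pvCanon, if_neg (by omega)]

theorem pvA_eq_canon (array : List Int) (target : Int) (hs : array.Pairwise (· ≤ ·)) :
    searchForRange array target = pvCanon array target := by
  have h1 := pvCntLe_le_length array target
  exact pvALoop_eq array target hs ((array.length : Int) - 0 + 1).toNat 0
    ((array.length : Int) - 1) (by omega) (by omega) (by positivity) (by omega) (by omega)

theorem pvB_eq_canon (array : List Int) (target : Int) (hs : array.Pairwise (· ≤ ·)) :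
    searchForRange_alt array target = pvCanon array target := by
  have h1 := pvCntLe_le_length array target
  have h2 := pvCntLt_le_cntLe array target
  rw [searchForRange_alt]
  rw [pvBisectL_eq array target hs (array.length : Nat) 0 (array.length : Int)
      (by omega) (by omega) (by positivity) (by omega) (by omega)]
  by_cases hL : (pvCntLt array target : Int) = (array.length : Int)
  · rw [if_pos hL, pvCanon, if_neg (by omega)]
  · rw [if_neg hL]
    have hc := pvGetChar array target hs (pvCntLt array target : Int) (by positivity) (by omega)
    by_cases hpres : (pvCntLt array target : Int) < (pvCntLe array target : Int)
    · rw [if_neg (by simp only [ne_eq, not_not]; exact hc.2.2.mpr (by omega))]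
      rw [pvBisectR_eq array target hs (array.length : Nat) (pvCntLt array target : Int)
          (array.length : Int) (by omega) (by positivity) (by omega) (by omega) (by omega)]
      rw [pvCanon, if_pos hpres]
    · rw [if_pos (fun heq => hpres (by have := hc.2.2.mp heq; omega))]
      rw [pvCanon, if_neg hpres]


-- when the target does not occur at all, A's loop can never take its equality branch
theorem pvALoop_notMem (array : List Int) (target : Int) (hnm : target ∉ array) :
    ∀ (k : Nat) (start e : Int), (e - start + 1).toNat ≤ k → 0 ≤ start →
      e ≤ (array.length : Int) - 1 →
      pvALoop array target start e = [-1, -1] := by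
  intro k
  induction k with
  | zero =>
    intro start e hk h0 hn
    rw [pvALoop, dif_neg (by omega)]
  | succ m ih =>
    intro start e hk h0 hn
    rw [pvALoop]
    by_cases h : start ≤ e
    · rw [dif_pos h]
      have hmid := PySem.Int.floordiv_two_mid_bounds h
      set idx := PySem.Int.floordiv (start + e) 2 with hidxdef
      have hg : PySem.List.pyGetD array idx 0 = array[idx.toNat] :=
        PySem.List.pyGetD_eq_getElem array 0 (by omega) (by omega)
      have hne : PySem.List.pyGetD array idx 0 ≠ target := by
        rw [hg]; intro heq; exact hnm (heq ▸ List.getElem_mem (by omega))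
      rw [if_neg hne]
      by_cases hlt : PySem.List.pyGetD array idx 0 < target
      · rw [if_pos hlt]; exact ih (idx + 1) e (by omega) (by omega) hn
      · rw [if_neg hlt]; exact ih start (idx - 1) (by omega) h0 (by omega)
    · rw [dif_neg h]

theorem pvBisectL_bounds (array : List Int) (target : Int) :
    ∀ (k : Nat) (lo hi : Int), (hi - lo).toNat ≤ k → lo ≤ hi →
      lo ≤ pvBisectL array target lo hi ∧ pvBisectL array target lo hi ≤ hi := by
  intro k
  induction k with
  | zero =>
    intro lo hi hk hlh
    rw [pvBisectL, dif_neg (by omega)]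
    omega
  | succ m ih =>
    intro lo hi hk hlh
    rw [pvBisectL]
    by_cases h : lo < hi
    · rw [dif_pos h]
      have hmid := PySem.Int.floordiv_two_mid_bounds (le_of_lt h)
      have hmlt := pvMidLt lo hi h
      set mid := PySem.Int.floordiv (lo + hi) 2 with hmiddef
      by_cases hv : PySem.List.pyGetD array mid 0 < target
      · rw [if_pos hv]
        have := ih (mid + 1) hi (by omega) (by omega); omega
      · rw [if_neg hv]
        have := ih lo mid (by omega) (by omega); omega
    · rw [dif_neg h]; omega

theorem pvB_notMem (array : List Int) (target : Int) (hnm : target ∉ array) :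
    searchForRange_alt array target = [-1, -1] := by
  rw [searchForRange_alt]
  have hb := pvBisectL_bounds array target (array.length : Nat) 0 (array.length : Int)
    (by omega) (by omega)
  set left := pvBisectL array target 0 (array.length : Int) with hleftdef
  by_cases hL : left = (array.length : Int)
  · rw [if_pos hL]
  · rw [if_neg hL]
    have hg : PySem.List.pyGetD array left 0 = array[left.toNat] :=
      PySem.List.pyGetD_eq_getElem array 0 (by omega) (by omega)
    rw [if_pos (by rw [hg]; intro heq; exact hnm (heq ▸ List.getElem_mem (by omega)))]

theorem pvA_notMem (array : List Int) (target : Int) (hnm : target ∉ array) :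
    searchForRange array target = [-1, -1] :=
  pvALoop_notMem array target hnm ((array.length : Int) - 0 + 1).toNat 0
    ((array.length : Int) - 1) (by omega) (by omega) (by omega)

-- ===== VERDICT (by name: the statement is the Claim_ definition above) =====
theorem searchForRange_spec : Claim_equal_searchForRange := by
  intro array target _ hpre
  unfold Spec_searchForRange
  rcases hpre with hs | hnm
  · rw [pvA_eq_canon array target hs, pvB_eq_canon array target hs]
  · rw [pvA_notMem array target hnm, pvB_notMem array target hnm]
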